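-- pv_equiv track=rewrite | github.com/KotisKotlyandii/lessons1 | ege22/139.py | f
-- ===== SOURCE A (Python) =====
-- def f(x):
--     a,b = 0,1
--     while x > 0:
--         a += 1
--         if x % 14 != 0:
--             b *= x % 14
--         x //= 14
--     return a,b
-- ===== SOURCE B (Python) =====
-- def f(x):
--     a, p = 0, 1
--     while p <= x:
--         a += 1
--         p *= 14
--     b = 1
--     while p > 1:
--         p //= 14
--         d = x // p % 14
--         if d != 0:
--             b *= d
--     return a, b
-- ===== Notes on version B (the rewrite author's own statement) =====
-- stated objective: alternative
-- what changed: A destructively divides x, reading base-14 digits least-significant-first with count and product fused in one loop; B never modifies x: it first finds the digit count as the least exponent whose base power exceeds x by growing that power, then reads the digits most-significant-first by dividing x by descending powers and multiplies the nonzero ones.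
import Mathlib
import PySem

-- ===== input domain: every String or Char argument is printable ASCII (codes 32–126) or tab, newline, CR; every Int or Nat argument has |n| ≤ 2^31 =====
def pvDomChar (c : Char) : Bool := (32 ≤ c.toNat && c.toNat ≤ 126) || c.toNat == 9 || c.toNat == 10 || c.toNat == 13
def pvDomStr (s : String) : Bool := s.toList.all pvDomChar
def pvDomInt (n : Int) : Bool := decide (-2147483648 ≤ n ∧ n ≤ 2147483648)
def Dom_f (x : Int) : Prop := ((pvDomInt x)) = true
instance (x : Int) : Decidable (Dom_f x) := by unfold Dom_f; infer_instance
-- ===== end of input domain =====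

-- B replaces A's destructive least-significant-first div/mod loop (count and product fused)
-- with: find the digit count a as the least a with 14^a > x by growing a power, then read the
-- digits most-significant-first as x // p % 14 for descending powers p; objective: alternative.

-- termination helper used by the ports' recursions
theorem pvFloordiv14_lt (x : Int) (h : 0 < x) :
    (PySem.Int.floordiv x 14).toNat < x.toNat := by
  rw [PySem.Int.floordiv_eq_ediv_of_pos (by omega)]
  omega

-- ===== PORT A =====
def fLoop (x a b : Int) : Int × Int :=
  if h : 0 < x then
    fLoop (PySem.Int.floordiv x 14) (a + 1)
      (if PySem.Int.mod x 14 ≠ 0 then b * PySem.Int.mod x 14 else b)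
  else (a, b)
  termination_by x.toNat
  decreasing_by exact pvFloordiv14_lt x h

def f (x : Int) : Int × Int := fLoop x 0 1

-- ===== PORT B =====
-- first while loop of Source B; the extra '1 ≤ p' conjunct is a totality guard only:
-- Python diverges when the loop runs with p ≤ 0, and the entry call has p = 1 with p
-- only ever multiplied by 14, so the branch it cuts is unreachable from f_alt.
def powLoop (x a p : Int) : Int × Int :=
  if h : p ≤ x ∧ 1 ≤ p then powLoop x (a + 1) (p * 14) else (a, p)
  termination_by (x + 1 - p).toNat
  decreasing_by omega

-- second while loop of Source B (p is dead after the loop, so only b is returned)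
def msbLoop (x p b : Int) : Int :=
  if h : 1 < p then
    msbLoop x (PySem.Int.floordiv p 14)
      (if PySem.Int.mod (PySem.Int.floordiv x (PySem.Int.floordiv p 14)) 14 ≠ 0 then
        b * PySem.Int.mod (PySem.Int.floordiv x (PySem.Int.floordiv p 14)) 14
      else b)
  else b
  termination_by p.toNat
  decreasing_by exact pvFloordiv14_lt p (by omega)

def f_alt (x : Int) : Int × Int :=
  let ap := powLoop x 0 1
  (ap.1, msbLoop x ap.2 1)

-- ===== PRECONDITION & SPEC =====
def Spec_f (x : Int) (out : Int × Int) : Prop := out = f_alt x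
instance (x : Int) (out : Int × Int) : Decidable (Spec_f x out) := by unfold Spec_f; infer_instance

-- ===== CLAIM (what is proved, stated in full; the proofs are below) =====
def Claim_equal_f : Prop := ∀ (x : Int), Dom_f x → Spec_f x (f x)

-- ===== LEMMAS AND PROOFS =====

-- the base-14 digit list of x, least significant first (proof-only helper)
def fDigits (x : Int) : List Int :=
  if h : 0 < x then PySem.Int.mod x 14 :: fDigits (PySem.Int.floordiv x 14)
  else []
  termination_by x.toNat
  decreasing_by exact pvFloordiv14_lt x h

-- product of the nonzero ones among the k lowest base-14 digits of x
def prodNZ : Int → Nat → Int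
  | _, 0 => 1
  | x, k + 1 => (if PySem.Int.mod x 14 ≠ 0 then PySem.Int.mod x 14 else 1)
      * prodNZ (PySem.Int.floordiv x 14) k

theorem fLoop_eq (n : Nat) : ∀ (x a b : Int), x.toNat ≤ n →
    fLoop x a b = (a + (fDigits x).length,
      (fDigits x).foldl (fun b d => if d ≠ 0 then b * d else b) b) := by
  induction n with
  | zero =>
    intro x a b hx
    rw [fLoop, fDigits]
    have : ¬ 0 < x := by omega
    simp [this]
  | succ n ih =>
    intro x a b hx
    rw [fLoop, fDigits]
    by_cases h : 0 < x
    · simp only [h, dif_pos]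
      rw [ih _ _ _ (by have := pvFloordiv14_lt x h; omega)]
      simp [List.foldl]
      ring
    · simp [h]

theorem foldl_eq_prodNZ (n : Nat) : ∀ (x b : Int), x.toNat ≤ n →
    (fDigits x).foldl (fun b d => if d ≠ 0 then b * d else b) b
      = b * prodNZ x (fDigits x).length := by
  induction n with
  | zero =>
    intro x b hx
    rw [fDigits]
    have : ¬ 0 < x := by omega
    simp [this, prodNZ]
  | succ n ih =>
    intro x b hx
    rw [fDigits]
    by_cases h : 0 < x
    · simp only [h, dif_pos, List.foldl, List.length_cons]
      rw [ih _ _ (by have := pvFloordiv14_lt x h; omega), prodNZ]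
      by_cases hm : PySem.Int.mod x 14 = 0
      · rw [if_neg (not_not_intro hm), if_neg (not_not_intro hm)]
        ring
      · rw [if_pos hm, if_pos hm]
        ring
    · simp [h, prodNZ]

theorem floordiv_floordiv (x p : Int) (hp : 1 ≤ p) :
    PySem.Int.floordiv (PySem.Int.floordiv x p) 14 = PySem.Int.floordiv x (p * 14) := by
  rw [PySem.Int.floordiv_eq_ediv_of_pos (show (0:Int) < p by omega),
      PySem.Int.floordiv_eq_ediv_of_pos (show (0:Int) < 14 by norm_num),
      PySem.Int.floordiv_eq_ediv_of_pos (show (0:Int) < p * 14 by positivity)]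
  exact Int.ediv_ediv_of_nonneg (by omega)

theorem floordiv_pos_iff (x p : Int) (hp : 1 ≤ p) :
    0 < PySem.Int.floordiv x p ↔ p ≤ x := by
  constructor
  · intro h
    have h1 : (1 : Int) ≤ PySem.Int.floordiv x p := h
    rw [PySem.Int.le_floordiv_iff_mul_le (show (0:Int) < p by omega)] at h1
    omega
  · intro h
    have h1 : (1 : Int) ≤ PySem.Int.floordiv x p := by
      rw [PySem.Int.le_floordiv_iff_mul_le (show (0:Int) < p by omega)]
      omega
    omega

theorem powLoop_eq (n : Nat) : ∀ (x a p : Int), 1 ≤ p → (x + 1 - p).toNat ≤ n →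
    powLoop x a p = (a + (fDigits (PySem.Int.floordiv x p)).length,
      p * 14 ^ (fDigits (PySem.Int.floordiv x p)).length) := by
  induction n with
  | zero =>
    intro x a p hp hx
    rw [powLoop]
    have hxp : ¬ (p ≤ x ∧ 1 ≤ p) := by omega
    have hnp : ¬ (0 < PySem.Int.floordiv x p) := by
      rw [floordiv_pos_iff x p hp]; omega
    rw [fDigits]
    simp [hxp, hnp]
  | succ n ih =>
    intro x a p hp hx
    rw [powLoop]
    by_cases h : p ≤ x ∧ 1 ≤ p
    · rw [dif_pos h, ih x (a + 1) (p * 14) (by omega) (by omega)]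
      have hpos : 0 < PySem.Int.floordiv x p := by
        rw [floordiv_pos_iff x p hp]; exact h.1
      have hfd : fDigits (PySem.Int.floordiv x p)
          = PySem.Int.mod (PySem.Int.floordiv x p) 14
            :: fDigits (PySem.Int.floordiv x (p * 14)) := by
        rw [fDigits, dif_pos hpos, floordiv_floordiv x p hp]
      rw [hfd, List.length_cons, Prod.mk.injEq]
      constructor
      · push_cast; ring
      · rw [pow_succ]; ring
    · have hnp : ¬ (0 < PySem.Int.floordiv x p) := by
        rw [floordiv_pos_iff x p hp]; omega
      rw [fDigits]
      simp [h, hnp]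

-- top-digit peeling for prodNZ
theorem prodNZ_succ_top (k : Nat) : ∀ (x : Int),
    prodNZ x (k + 1)
      = (if PySem.Int.mod (PySem.Int.floordiv x ((14 : Int) ^ k)) 14 ≠ 0 then
          PySem.Int.mod (PySem.Int.floordiv x ((14 : Int) ^ k)) 14 else 1) * prodNZ x k := by
  induction k with
  | zero =>
    intro x
    have h1 : PySem.Int.floordiv x ((14 : Int) ^ 0) = x := by
      rw [pow_zero, PySem.Int.floordiv_eq_ediv_of_pos (by norm_num), Int.ediv_one]
    simp only [prodNZ, h1]
  | succ k ih =>
    intro x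
    have h2 : PySem.Int.floordiv (PySem.Int.floordiv x 14) ((14 : Int) ^ k)
        = PySem.Int.floordiv x ((14 : Int) ^ (k + 1)) := by
      rw [PySem.Int.floordiv_eq_ediv_of_pos (show (0:Int) < 14 by norm_num),
          PySem.Int.floordiv_eq_ediv_of_pos (show (0:Int) < (14:Int) ^ k by positivity),
          PySem.Int.floordiv_eq_ediv_of_pos (show (0:Int) < (14:Int) ^ (k+1) by positivity),
          Int.ediv_ediv_of_nonneg (by norm_num), pow_succ, mul_comm ((14:Int)^k) 14]
    calc prodNZ x (k + 1 + 1)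
        = (if PySem.Int.mod x 14 ≠ 0 then PySem.Int.mod x 14 else 1)
            * prodNZ (PySem.Int.floordiv x 14) (k + 1) := rfl
      _ = (if PySem.Int.mod x 14 ≠ 0 then PySem.Int.mod x 14 else 1)
            * ((if PySem.Int.mod (PySem.Int.floordiv (PySem.Int.floordiv x 14) ((14:Int)^k)) 14 ≠ 0
                then PySem.Int.mod (PySem.Int.floordiv (PySem.Int.floordiv x 14) ((14:Int)^k)) 14 else 1)
              * prodNZ (PySem.Int.floordiv x 14) k) := by rw [ih]
      _ = (if PySem.Int.mod (PySem.Int.floordiv x ((14:Int)^(k+1))) 14 ≠ 0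
            then PySem.Int.mod (PySem.Int.floordiv x ((14:Int)^(k+1))) 14 else 1)
          * ((if PySem.Int.mod x 14 ≠ 0 then PySem.Int.mod x 14 else 1)
              * prodNZ (PySem.Int.floordiv x 14) k) := by rw [h2]; ring
      _ = _ := by rw [show prodNZ x (k+1) = (if PySem.Int.mod x 14 ≠ 0 then PySem.Int.mod x 14 else 1)
              * prodNZ (PySem.Int.floordiv x 14) k from rfl]

theorem msbLoop_eq (k : Nat) : ∀ (x b : Int),
    msbLoop x ((14 : Int) ^ k) b = b * prodNZ x k := by
  induction k with
  | zero =>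
    intro x b
    rw [msbLoop]
    norm_num [prodNZ]
  | succ k ih =>
    intro x b
    have hgt : (1 : Int) < 14 ^ (k + 1) := by
      have h14 : ((14 : Int) ^ 1) ≤ 14 ^ (k + 1) := pow_le_pow_right₀ (by norm_num) (by omega)
      rw [pow_one] at h14
      omega
    have hdiv : PySem.Int.floordiv ((14 : Int) ^ (k + 1)) 14 = (14 : Int) ^ k := by
      rw [PySem.Int.floordiv_eq_ediv_of_pos (show (0:Int) < 14 by norm_num), pow_succ,
          Int.mul_ediv_cancel _ (by norm_num)]
    rw [msbLoop, dif_pos hgt, hdiv, ih, prodNZ_succ_top]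
    by_cases hm : PySem.Int.mod (PySem.Int.floordiv x ((14 : Int) ^ k)) 14 = 0
    · rw [if_neg (not_not_intro hm), if_neg (not_not_intro hm)]
      ring
    · rw [if_pos hm, if_pos hm]
      ring

-- ===== VERDICT (by name: the statement is the Claim_ definition above) =====
theorem f_spec : Claim_equal_f := by
  intro x _
  unfold Spec_f f f_alt
  have hx1 : PySem.Int.floordiv x 1 = x := by
    rw [PySem.Int.floordiv_eq_ediv_of_pos (by norm_num), Int.ediv_one]
  rw [fLoop_eq x.toNat x 0 1 le_rfl,
      powLoop_eq (x + 1 - 1).toNat x 0 1 (by omega) le_rfl, hx1]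
  simp only [one_mul, zero_add]
  rw [msbLoop_eq, foldl_eq_prodNZ x.toNat x 1 le_rfl, one_mul]
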